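-- pv_equiv track=rewrite | github.com/maurusrv/advent-of-code | code/py/2015/day1/day1.py | get_position_to_first_enter_basement_v2
-- ===== SOURCE A (Python) =====
-- def get_floor (instruction, current_floor = 0):
--   floor = current_floor
--
--   for paren in instruction:
--     if paren == '(':
--       floor += 1
--     elif paren == ')':
--       floor -= 1
--
--   return floor
--
-- def get_position_to_first_enter_basement_v2 (instruction):
--   position = 0
--
--   length = len(instruction)
--
--   for i in range(length):
--     floor = get_floor(instruction[0:i+1])
--
--     if floor == -1:
--       position = i + 1
--       break
--
--   return position
-- ===== SOURCE B (Python) =====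
-- def get_position_to_first_enter_basement_v2(instruction):
--     floor = 0
--     for i, c in enumerate(instruction):
--         if c == '(':
--             floor += 1
--         elif c == ')':
--             floor -= 1
--         if floor == -1:
--             return i + 1
--     return 0
-- ===== Notes on version B (the rewrite author's own statement) =====
-- stated objective: faster
-- what changed: Single pass keeping a running floor counter and returning at the first index where it hits -1, instead of recomputing the floor of every prefix from scratch.
import Mathlib
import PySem

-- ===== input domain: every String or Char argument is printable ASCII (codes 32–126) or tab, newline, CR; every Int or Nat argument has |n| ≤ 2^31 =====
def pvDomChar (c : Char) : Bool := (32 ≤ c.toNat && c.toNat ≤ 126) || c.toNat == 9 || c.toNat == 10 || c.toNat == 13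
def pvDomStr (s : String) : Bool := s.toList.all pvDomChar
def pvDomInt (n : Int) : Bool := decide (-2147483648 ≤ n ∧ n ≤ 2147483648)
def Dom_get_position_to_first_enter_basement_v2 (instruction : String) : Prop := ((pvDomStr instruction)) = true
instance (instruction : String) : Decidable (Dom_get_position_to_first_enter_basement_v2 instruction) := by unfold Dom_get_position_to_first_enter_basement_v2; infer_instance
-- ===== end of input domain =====

-- One honest line: B replaces A's O(n^2) recomputation of every prefix's floor with a
-- single pass keeping a running floor counter; asymptotically faster, same value everywhere.

-- ===== PORT A =====
-- helper get_floor: fold over the characters, +1 for '(', -1 for ')'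
def get_floor (instruction : List Char) (current_floor : Int) : Int :=
  instruction.foldl (fun floor paren =>
    if paren = '(' then floor + 1
    else if paren = ')' then floor - 1
    else floor) current_floor

-- A's loop over i in range(length): floor of the slice [0:i+1]; break at -1 (position stays 0 otherwise)
def pvALoop (s : List Char) (i : Nat) : Int :=
  if _h : i < s.length then
    let floor := get_floor (s.take (i + 1)) 0
    if floor = -1 then ((i : Int) + 1) else pvALoop s (i + 1)
  else 0
termination_by s.length - i

def get_position_to_first_enter_basement_v2 (instruction : String) : Int :=
  pvALoop instruction.toList 0

-- ===== PORT B =====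
-- single pass: running floor, return i+1 at the first time it equals -1
def pvBLoop : List Char → Nat → Int → Int
  | [], _, _ => 0
  | c :: rest, i, floor =>
    let floor' := if c = '(' then floor + 1
                  else if c = ')' then floor - 1
                  else floor
    if floor' = -1 then ((i : Int) + 1) else pvBLoop rest (i + 1) floor'

def get_position_to_first_enter_basement_v2_alt (instruction : String) : Int :=
  pvBLoop instruction.toList 0 0

-- ===== PRECONDITION & SPEC =====
def Spec_get_position_to_first_enter_basement_v2 (instruction : String) (out : Int) : Prop := out = get_position_to_first_enter_basement_v2_alt instruction
instance (instruction : String) (out : Int) : Decidable (Spec_get_position_to_first_enter_basement_v2 instruction out) := by unfold Spec_get_position_to_first_enter_basement_v2; infer_instance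

-- ===== CLAIM (what is proved, stated in full; the proofs are below) =====
def Claim_equal_get_position_to_first_enter_basement_v2 : Prop := ∀ (instruction : String), Dom_get_position_to_first_enter_basement_v2 instruction → Spec_get_position_to_first_enter_basement_v2 instruction (get_position_to_first_enter_basement_v2 instruction)

-- ===== LEMMAS AND PROOFS =====

-- the step function shared by both loops
def pvStep (floor : Int) (c : Char) : Int :=
  if c = '(' then floor + 1 else if c = ')' then floor - 1 else floor

theorem get_floor_eq_foldl (l : List Char) (f : Int) :
    get_floor l f = l.foldl pvStep f := rfl

-- floor of the (i+1)-prefix = step applied to the floor of the i-prefix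
theorem prefix_floor_succ (s : List Char) (i : Nat) (h : i < s.length) :
    (s.take (i + 1)).foldl pvStep 0 = pvStep ((s.take i).foldl pvStep 0) s[i] := by
  rw [List.take_add_one, List.getElem?_eq_getElem h, Option.toList_some, List.foldl_append]
  rfl

-- main invariant: A's loop from index i equals B's loop on the remaining suffix,
-- carrying the floor of the i-prefix
theorem loops_agree (s : List Char) (i : Nat) (hi : i ≤ s.length) :
    pvALoop s i = pvBLoop (s.drop i) i ((s.take i).foldl pvStep 0) := by
  by_cases h : i < s.length
  · have hdrop : s.drop i = s[i] :: s.drop (i + 1) := List.drop_eq_getElem_cons h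
    rw [pvALoop, dif_pos h, hdrop]
    simp only [pvBLoop]
    rw [get_floor_eq_foldl, prefix_floor_succ s i h]
    have hstep : pvStep ((s.take i).foldl pvStep 0) s[i]
        = (if s[i] = '(' then (s.take i).foldl pvStep 0 + 1
           else if s[i] = ')' then (s.take i).foldl pvStep 0 - 1
           else (s.take i).foldl pvStep 0) := rfl
    rw [← hstep]
    by_cases hf : pvStep ((s.take i).foldl pvStep 0) s[i] = -1
    · simp [hf]
    · simp only [if_neg hf]
      rw [loops_agree s (i + 1) h, prefix_floor_succ s i h]
  · have : i = s.length := le_antisymm hi (not_lt.mp h)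
    subst this
    rw [pvALoop, dif_neg (lt_irrefl _)]
    simp [pvBLoop]
termination_by s.length - i

-- ===== VERDICT (by name: the statement is the Claim_ definition above) =====
theorem get_position_to_first_enter_basement_v2_spec : Claim_equal_get_position_to_first_enter_basement_v2 := by
  intro instruction _
  unfold Spec_get_position_to_first_enter_basement_v2
  unfold get_position_to_first_enter_basement_v2 get_position_to_first_enter_basement_v2_alt
  rw [loops_agree instruction.toList 0 (Nat.zero_le _)]
  simp
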